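-- pv_equiv track=rewrite | github.com/hughdbrown/explode | explode.py | _generate_animations
-- ===== SOURCE A (Python) =====
-- def _generate_animations(bombs, force):
--     # Keep track of the locations of left-moving and right-moving shrapnel
--     # in their own sets, initializing the location of each piece to the
--     # location of the bomb from which they come.
--     yield bombs
--     chamber_size = len(bombs)
--     left, right = _initialize_shrapnel_locations(bombs)
--     # Update the animation until no more shrapnel is flying.
--     while left or right:
--         left, right = _update_shrapnel(left, right, force, chamber_size)
--         # Update the locations of the shrapnel.
--         chamber = ['.'] * chamber_size
--         for left_shrapnel in left:
--             chamber[left_shrapnel] = '<'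
--         for right_shrapnel in right:
--             chamber[right_shrapnel] = '>'
--         for both_shrapnel in left & right:
--             chamber[both_shrapnel] = 'X'
--         # Join the chamber into a string and add it to the animation.
--         yield "".join(chamber)
--
-- def _initialize_shrapnel_locations(bombs):
--     """
--     Returns two sets of locations, representing locations of left-moving and
--     right-moving shrapnel, initialized to the positions of the bombs from
--     which they come.
--
--     @param bombs: A string comprised of '.' and 'B' characters, the 'B'
--                   representing bombs, the locations of which in the string
--                   are to be placed in left and right shrapnel sets.
--     @return: Two identical sets, each with the locations in the input string
--              of the bombs.
--     """
--     if set(bombs) - set('.B'):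
--         raise Exception("Improper string input 'bombs'.")
--     left = set(index for index, char in enumerate(bombs) if char == 'B')
--     return left, left.copy()
--
-- def _update_shrapnel(left, right, force, chamber_size):
--     """
--     Given two sets with the locations of left and right moving shrapnel,
--     returns two sets with the updated locations after they have moved
--     a distance given by the parameter 'force'.
--     """
--     def _updated_shrapnel(series):
--         return set(shrapnel for shrapnel in series if 0 <= shrapnel < chamber_size)
--     nextleft = _updated_shrapnel(shrapnel - force for shrapnel in left)
--     nextright = _updated_shrapnel(shrapnel + force for shrapnel in right)
--     return nextleft, nextright
-- ===== SOURCE B (Python) =====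
-- def _generate_animations(bombs, force):
--     # B: yields the same frames, but recomputes each frame's shrapnel positions
--     # directly from the original bomb positions (b -/+ force*t) instead of
--     # carrying mutated sets between frames; frames are built in one pass.
--     yield bombs
--     if any(c not in '.B' for c in bombs):
--         raise Exception("Improper string input 'bombs'.")
--     n = len(bombs)
--     bomb_positions = [i for i, c in enumerate(bombs) if c == 'B']
--     t = 1
--     while any(0 <= b - force * (t - 1) < n for b in bomb_positions) or \
--           any(0 <= b + force * (t - 1) < n for b in bomb_positions):
--         left = {b - force * t for b in bomb_positions if 0 <= b - force * t < n}
--         right = {b + force * t for b in bomb_positions if 0 <= b + force * t < n}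
--         chamber = []
--         for i in range(n):
--             if i in left and i in right:
--                 chamber.append('X')
--             elif i in left:
--                 chamber.append('<')
--             elif i in right:
--                 chamber.append('>')
--             else:
--                 chamber.append('.')
--         yield ''.join(chamber)
--         t += 1
-- ===== Notes on version B (the rewrite author's own statement) =====
-- stated objective: alternative
-- what changed: B recomputes each frame's shrapnel positions in closed form from the original bomb indices (b -/+ force*t) instead of carrying and mutating two sets between frames, and builds each frame string in a single pass over indices instead of mutating a '.'-filled list with three write passes.
import Mathlib
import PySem

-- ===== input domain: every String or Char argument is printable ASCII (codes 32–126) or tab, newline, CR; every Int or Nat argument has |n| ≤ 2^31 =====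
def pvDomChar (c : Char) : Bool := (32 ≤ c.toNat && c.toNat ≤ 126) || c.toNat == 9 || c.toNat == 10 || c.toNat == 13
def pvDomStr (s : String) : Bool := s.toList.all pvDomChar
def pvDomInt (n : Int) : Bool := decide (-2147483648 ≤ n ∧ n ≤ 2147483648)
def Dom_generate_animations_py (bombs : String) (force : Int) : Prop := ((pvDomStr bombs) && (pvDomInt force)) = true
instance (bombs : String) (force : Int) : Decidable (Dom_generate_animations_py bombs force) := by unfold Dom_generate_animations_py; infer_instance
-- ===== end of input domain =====

-- B recomputes each frame's shrapnel positions directly from the original bomb indices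
-- (b ∓ force·t) instead of carrying mutated sets, and builds each frame in one pass (alternative decomposition, same cost).


-- ===== PORT A =====
-- [i for i, c in enumerate(bombs) if c == 'B']  (shared subexpression of both Pythons)
def pvBombIdx (cs : List Char) : List Int :=
  (PySem.List.enumerate cs 0).filterMap (fun p => if p.2 = 'B' then some p.1 else none)

-- 0 <= x < n
def pvInRange (n x : Int) : Bool := decide (0 ≤ x) && decide (x < n)

-- _updated_shrapnel: set(s for s in series if 0 <= s < chamber_size), series already shifted
def pvUpdatedA (s : List Int) (n : Int) : PySem.Set Int :=
  PySem.Set.ofList (s.filter (fun x => pvInRange n x))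

-- chamber = ['.']*n; three write passes ('<', '>', then 'X' on left & right); "".join
def pvFrameA (n : Nat) (left right : PySem.Set Int) : String :=
  let c0 := List.replicate n '.'
  let c1 := left.foldl (fun ch i => PySem.List.pySetD ch i '<') c0
  let c2 := right.foldl (fun ch i => PySem.List.pySetD ch i '>') c1
  let c3 := (PySem.Set.inter left right).foldl (fun ch i => PySem.List.pySetD ch i 'X') c2
  String.mk c3

-- while left or right: update; yield frame.  fuel n+2 covers every terminating run
-- (with force ≠ 0 all shrapnel is out of the chamber after at most n steps; force = 0
-- with a bomb makes the Python loop forever — excluded by Pre_).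
def pvLoopA (force : Int) (n : Nat) : PySem.Set Int → PySem.Set Int → Nat → List String
  | _, _, 0 => []
  | left, right, fuel+1 =>
    if left.isEmpty && right.isEmpty then []
    else
      let left' := pvUpdatedA (left.map (fun x => x - force)) (n : Int)
      let right' := pvUpdatedA (right.map (fun x => x + force)) (n : Int)
      pvFrameA n left' right' :: pvLoopA force n left' right' fuel

def generate_animations_py (bombs : String) (force : Int) : List String :=
  let cs := bombs.toList
  -- _initialize_shrapnel_locations raises Exception here (excluded by Pre_): only the first yield happened
  if ¬ (PySem.Set.diff (PySem.Set.ofList cs) (PySem.Set.ofList ['.', 'B'])).isEmpty then [bombs]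
  else
    let init : PySem.Set Int := PySem.Set.ofList (pvBombIdx cs)
    bombs :: pvLoopA force cs.length init init (cs.length + 2)

-- ===== PORT B =====
-- {b - force*t for b in bomb_positions if 0 <= b - force*t < n}  (as its generating list, nodup)
def pvLeftOf (bombIdx : List Int) (force t n : Int) : List Int :=
  bombIdx.filterMap (fun b => if pvInRange n (b - force * t) then some (b - force * t) else none)

def pvRightOf (bombIdx : List Int) (force t n : Int) : List Int :=
  bombIdx.filterMap (fun b => if pvInRange n (b + force * t) then some (b + force * t) else none)

-- any(0 <= b - force*t < n ...) or any(0 <= b + force*t < n ...)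
def pvOccupied (bombIdx : List Int) (force t n : Int) : Bool :=
  bombIdx.any (fun b => pvInRange n (b - force * t)) || bombIdx.any (fun b => pvInRange n (b + force * t))

-- one pass over range(n), appending the char for each cell; "".join
def pvFrameB (n : Nat) (left right : PySem.Set Int) : String :=
  String.mk ((List.range n).map (fun (i : Nat) =>
    if (i : Int) ∈ left ∧ (i : Int) ∈ right then 'X'
    else if (i : Int) ∈ left then '<'
    else if (i : Int) ∈ right then '>'
    else '.'))

def pvLoopB (bombIdx : List Int) (force : Int) (n : Nat) : Int → Nat → List String
  | _, 0 => []
  | t, fuel+1 =>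
    if pvOccupied bombIdx force (t - 1) (n : Int) then
      pvFrameB n (PySem.Set.ofList (pvLeftOf bombIdx force t (n : Int)))
                 (PySem.Set.ofList (pvRightOf bombIdx force t (n : Int)))
        :: pvLoopB bombIdx force n (t + 1) fuel
    else []

def generate_animations_py_alt (bombs : String) (force : Int) : List String :=
  let cs := bombs.toList
  -- B raises the same Exception here (excluded by Pre_)
  if cs.any (fun c => ¬(c = '.' ∨ c = 'B')) then [bombs]
  else bombs :: pvLoopB (pvBombIdx cs) force cs.length 1 (cs.length + 2)

-- ===== PRECONDITION & SPEC =====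
-- Pre_ excludes exactly the inputs where the Python A does not return a list:
-- a character outside '.B' makes it raise Exception, and force = 0 with at least
-- one 'B' makes its while-loop run forever.
def Pre_generate_animations_py (bombs : String) (force : Int) : Prop :=
  (bombs.toList.all (fun c => c = '.' || c = 'B') = true) ∧ (force ≠ 0 ∨ 'B' ∉ bombs.toList)
instance (bombs : String) (force : Int) : Decidable (Pre_generate_animations_py bombs force) := by
  unfold Pre_generate_animations_py; infer_instance

def pvWitness_generate_animations_py : String × Int := ("..B.", 2)

def Spec_generate_animations_py (bombs : String) (force : Int) (out : List String) : Prop := out = generate_animations_py_alt bombs force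
instance (bombs : String) (force : Int) (out : List String) : Decidable (Spec_generate_animations_py bombs force out) := by unfold Spec_generate_animations_py; infer_instance

-- ===== CLAIM (what is proved, stated in full; the proofs are below) =====
def Claim_equal_generate_animations_py : Prop := ∀ (bombs : String) (force : Int), Dom_generate_animations_py bombs force → Pre_generate_animations_py bombs force → Spec_generate_animations_py bombs force (generate_animations_py bombs force)


-- ===== LEMMAS AND PROOFS =====

-- every bomb index is a chamber position
theorem pv_bombIdx_bounds (cs : List Char) :
    ∀ b ∈ pvBombIdx cs, 0 ≤ b ∧ b < (cs.length : Int) := by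
  intro b hb
  unfold pvBombIdx at hb
  obtain ⟨p, hp, hpb⟩ := List.mem_filterMap.mp hb
  rw [PySem.List.mem_enumerate_iff] at hp
  obtain ⟨k, hk, rfl⟩ := hp
  split at hpb
  · simp_all; omega
  · simp at hpb

theorem pv_bombIdx_nodup (cs : List Char) : (pvBombIdx cs).Nodup := by
  unfold pvBombIdx
  apply List.Nodup.filterMap
  · intro p q b hbp hbq
    by_cases hp : p.2 = 'B' <;> simp [hp] at hbp
    by_cases hq : q.2 = 'B' <;> simp [hq] at hbq
    obtain ⟨p1, p2⟩ := p
    obtain ⟨q1, q2⟩ := q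
    simp_all
  · refine List.Pairwise.imp ?_ (PySem.List.pairwise_lt_enumerate cs 0)
    intro a b h he
    rw [he] at h
    exact lt_irrefl _ h

theorem pv_bombIdx_nil_iff (cs : List Char) : pvBombIdx cs = [] ↔ 'B' ∉ cs := by
  unfold pvBombIdx
  rw [List.filterMap_eq_nil_iff]
  constructor
  · intro h hBmem
    obtain ⟨p, hp, hp2⟩ := List.mem_map.mp
      (by rw [PySem.List.map_snd_enumerate]; exact hBmem :
        'B' ∈ (PySem.List.enumerate cs 0).map (fun p => p.2))
    have := h p hp
    simp [hp2] at this
  · intro h p hp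
    by_cases hc : p.2 = 'B'
    · exfalso
      apply h
      have hmem : p.2 ∈ (PySem.List.enumerate cs 0).map (fun p => p.2) :=
        List.mem_map_of_mem hp
      rw [PySem.List.map_snd_enumerate] at hmem
      exact hc ▸ hmem
    · simp [hc]

-- members of the recomputed sets are chamber positions
theorem pv_leftOf_bounds (B : List Int) (f t N : Int) :
    ∀ x ∈ pvLeftOf B f t N, 0 ≤ x ∧ x < N := by
  intro x hx
  unfold pvLeftOf at hx
  obtain ⟨b, _, hb⟩ := List.mem_filterMap.mp hx
  split at hb
  · rename_i h
    unfold pvInRange at h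
    simp at h hb
    omega
  · simp at hb

theorem pv_rightOf_bounds (B : List Int) (f t N : Int) :
    ∀ x ∈ pvRightOf B f t N, 0 ≤ x ∧ x < N := by
  intro x hx
  unfold pvRightOf at hx
  obtain ⟨b, _, hb⟩ := List.mem_filterMap.mp hx
  split at hb
  · rename_i h
    unfold pvInRange at h
    simp at h hb
    omega
  · simp at hb

theorem pv_leftOf_nodup (B : List Int) (f t N : Int) (h : B.Nodup) : (pvLeftOf B f t N).Nodup := by
  unfold pvLeftOf
  apply List.Nodup.filterMap _ h
  intro a a' b hba hba'
  split at hba <;> split at hba' <;> simp_all; omega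

theorem pv_rightOf_nodup (B : List Int) (f t N : Int) (h : B.Nodup) : (pvRightOf B f t N).Nodup := by
  unfold pvRightOf
  apply List.Nodup.filterMap _ h
  intro a a' b hba hba'
  split at hba <;> split at hba' <;> simp_all; omega

-- at t = 0 the shrapnel sits on the bombs
theorem pv_leftOf_zero (B : List Int) (f N : Int) (hb : ∀ b ∈ B, 0 ≤ b ∧ b < N) :
    pvLeftOf B f 0 N = B := by
  unfold pvLeftOf
  rw [List.filterMap_eq_map_iff_forall_eq_some.mpr ?_, List.map_id]
  intro b hbm
  have := hb b hbm
  simp [pvInRange]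
  omega

theorem pv_rightOf_zero (B : List Int) (f N : Int) (hb : ∀ b ∈ B, 0 ≤ b ∧ b < N) :
    pvRightOf B f 0 N = B := by
  unfold pvRightOf
  rw [List.filterMap_eq_map_iff_forall_eq_some.mpr ?_, List.map_id]
  intro b hbm
  have := hb b hbm
  simp [pvInRange]
  omega

-- a position in range at step t+1 was in range at step t (force ≠ 0, bomb inside the chamber)
theorem pv_inR_mono_left (f t N b : Int) (hf : f ≠ 0) (ht : 0 ≤ t) (hb0 : 0 ≤ b) (hbN : b < N)
    (h : pvInRange N (b - f * (t + 1)) = true) : pvInRange N (b - f * t) = true := by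
  unfold pvInRange at *
  simp only [Bool.and_eq_true, decide_eq_true_eq] at *
  have hft : f * (t + 1) = f * t + f := by ring
  rcases lt_trichotomy f 0 with hf' | hf' | hf'
  · have h0 : f * t ≤ 0 := mul_nonpos_of_nonpos_of_nonneg hf'.le ht
    constructor <;> linarith
  · exact absurd hf' hf
  · have h0 : 0 ≤ f * t := mul_nonneg hf'.le ht
    constructor <;> linarith

theorem pv_inR_mono_right (f t N b : Int) (hf : f ≠ 0) (ht : 0 ≤ t) (hb0 : 0 ≤ b) (hbN : b < N)
    (h : pvInRange N (b + f * (t + 1)) = true) : pvInRange N (b + f * t) = true := by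
  unfold pvInRange at *
  simp only [Bool.and_eq_true, decide_eq_true_eq] at *
  have hft : f * (t + 1) = f * t + f := by ring
  rcases lt_trichotomy f 0 with hf' | hf' | hf'
  · have h0 : f * t ≤ 0 := mul_nonpos_of_nonpos_of_nonneg hf'.le ht
    constructor <;> linarith
  · exact absurd hf' hf
  · have h0 : 0 ≤ f * t := mul_nonneg hf'.le ht
    constructor <;> linarith

-- THE KEY STEP: A's shift-and-filter of the time-t set is B's direct time-(t+1) set
theorem pv_step_left (B : List Int) (f t N : Int) (hf : f ≠ 0) (ht : 0 ≤ t)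
    (hb : ∀ b ∈ B, 0 ≤ b ∧ b < N) :
    ((pvLeftOf B f t N).map (fun x => x - f)).filter (fun x => pvInRange N x)
      = pvLeftOf B f (t + 1) N := by
  induction B with
  | nil => rfl
  | cons b B ih =>
    have hbb := hb b (by simp)
    have ihh := ih (fun x hx => hb x (by simp [hx]))
    unfold pvLeftOf at *
    have harith : b - f * t - f = b - f * (t + 1) := by ring
    by_cases hct : pvInRange N (b - f * t) = true
    · by_cases hct1 : pvInRange N (b - f * (t + 1)) = true
      · simp [List.filterMap_cons, hct, hct1, harith, ihh]
      · simp [List.filterMap_cons, hct, hct1, harith, ihh,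
          (by rw [harith]; simpa using hct1 : ¬ pvInRange N (b - f * t - f) = true)]
    · have : ¬ pvInRange N (b - f * (t + 1)) = true := fun h =>
        hct (pv_inR_mono_left f t N b hf ht hbb.1 hbb.2 h)
      simp [List.filterMap_cons, hct, this, ihh]

theorem pv_step_right (B : List Int) (f t N : Int) (hf : f ≠ 0) (ht : 0 ≤ t)
    (hb : ∀ b ∈ B, 0 ≤ b ∧ b < N) :
    ((pvRightOf B f t N).map (fun x => x + f)).filter (fun x => pvInRange N x)
      = pvRightOf B f (t + 1) N := by
  induction B with
  | nil => rfl
  | cons b B ih =>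
    have hbb := hb b (by simp)
    have ihh := ih (fun x hx => hb x (by simp [hx]))
    unfold pvRightOf at *
    have harith : b + f * t + f = b + f * (t + 1) := by ring
    by_cases hct : pvInRange N (b + f * t) = true
    · by_cases hct1 : pvInRange N (b + f * (t + 1)) = true
      · simp [List.filterMap_cons, hct, hct1, harith, ihh]
      · simp [List.filterMap_cons, hct, hct1, harith, ihh,
          (by rw [harith]; simpa using hct1 : ¬ pvInRange N (b + f * t + f) = true)]
    · have : ¬ pvInRange N (b + f * (t + 1)) = true := fun h =>
        hct (pv_inR_mono_right f t N b hf ht hbb.1 hbb.2 h)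
      simp [List.filterMap_cons, hct, this, ihh]

-- A's loop test on the carried lists is B's occupancy test on the bomb indices
theorem pv_empty_iff (B : List Int) (f t N : Int) :
    ((pvLeftOf B f t N).isEmpty && (pvRightOf B f t N).isEmpty)
      = !(pvOccupied B f t N) := by
  rw [Bool.eq_iff_iff]
  simp only [pvOccupied, pvLeftOf, pvRightOf, Bool.and_eq_true, List.isEmpty_iff,
    List.filterMap_eq_nil_iff, Bool.not_eq_true', Bool.or_eq_false_iff, List.any_eq_false]
  constructor
  · rintro ⟨h1, h2⟩
    refine ⟨fun b hb hc => ?_, fun b hb hc => ?_⟩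
    · have := h1 b hb; simp [hc] at this
    · have := h2 b hb; simp [hc] at this
  · rintro ⟨h1, h2⟩
    refine ⟨fun b hb => ?_, fun b hb => ?_⟩
    · simp [h1 b hb]
    · simp [h2 b hb]

-- one same-char write pass: length and cells
theorem pv_write_length (c : Char) (L : List Int) (init : List Char) :
    (L.foldl (fun ch j => PySem.List.pySetD ch j c) init).length = init.length := by
  induction L generalizing init with
  | nil => rfl
  | cons j L ih => simp [List.foldl_cons, ih, PySem.List.length_pySetD]

theorem pv_write_get (c : Char) (L : List Int) (init : List Char)
    (h : ∀ j ∈ L, 0 ≤ j ∧ j < (init.length : Int)) (i : Nat) :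
    (L.foldl (fun ch j => PySem.List.pySetD ch j c) init)[i]?
      = if (i : Int) ∈ L then some c else init[i]? := by
  induction L generalizing init with
  | nil => simp
  | cons j L ih =>
    have hj := h j (by simp)
    rw [List.foldl_cons, PySem.List.pySetD_of_nonneg _ _ hj.1,
      ih _ (by intro x hx; have := h x (by simp [hx]); simpa using this)]
    by_cases hiL : (i : Int) ∈ L
    · simp [hiL]
    · have hm : ((i : Int) ∈ j :: L) ↔ (i : Int) = j := by simp [hiL]
      rw [if_neg hiL, List.getElem?_set]
      simp only [hm]
      by_cases he : (i : Int) = j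
      · simp [show j.toNat = i by omega, show i < init.length by omega, he]
      · simp [show ¬ j.toNat = i by omega, he]

-- the three write passes of A produce B's single-pass frame
theorem pv_frame_eq (n : Nat) (L R : List Int)
    (hL : ∀ j ∈ L, 0 ≤ j ∧ j < (n : Int)) (hR : ∀ j ∈ R, 0 ≤ j ∧ j < (n : Int)) :
    pvFrameA n L R = pvFrameB n L R := by
  unfold pvFrameA pvFrameB
  refine congrArg String.mk ?_
  have hL1 : ∀ j ∈ L, 0 ≤ j ∧ j < ((List.replicate n '.').length : Int) := by
    simpa [List.length_replicate] using hL
  have hlen1 := pv_write_length '<' L (List.replicate n '.')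
  have hR1 : ∀ j ∈ R, 0 ≤ j ∧ j <
      ((L.foldl (fun ch j => PySem.List.pySetD ch j '<') (List.replicate n '.')).length : Int) := by
    rw [hlen1, List.length_replicate]; exact hR
  have hlen2 := pv_write_length '>' R
    (L.foldl (fun ch j => PySem.List.pySetD ch j '<') (List.replicate n '.'))
  have hI : ∀ j ∈ PySem.Set.inter L R, 0 ≤ j ∧ j <
      ((R.foldl (fun ch j => PySem.List.pySetD ch j '>')
        (L.foldl (fun ch j => PySem.List.pySetD ch j '<') (List.replicate n '.'))).length : Int) := by
    rw [hlen2, hlen1, List.length_replicate]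
    intro j hj
    exact hL j ((PySem.Set.mem_inter L R j).mp hj).1
  apply List.ext_getElem?
  intro i
  rw [pv_write_get 'X' _ _ hI i, pv_write_get '>' R _ hR1 i, pv_write_get '<' L _ hL1 i]
  by_cases hi : i < n
  · rw [List.getElem?_map, List.getElem?_range hi, List.getElem?_replicate, if_pos hi]
    by_cases hiL : (i : Int) ∈ L <;> by_cases hiR : (i : Int) ∈ R <;>
      simp [PySem.Set.mem_inter, hiL, hiR]
  · have hnL : (i : Int) ∉ L := fun hm => hi (by have := hL _ hm; omega)
    have hnR : (i : Int) ∉ R := fun hm => hi (by have := hR _ hm; omega)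
    have hnI : (i : Int) ∉ PySem.Set.inter L R := fun hm =>
      hnL ((PySem.Set.mem_inter L R (i : Int)).mp hm).1
    rw [if_neg hnI, if_neg hnR, if_neg hnL, List.getElem?_replicate, if_neg hi]
    symm
    apply List.getElem?_eq_none
    simpa using Nat.le_of_not_lt hi

-- the simulation: A's loop carrying the time-(t-1) sets is B's loop at step t
theorem pv_sim (B : List Int) (f : Int) (n : Nat)
    (hb : ∀ b ∈ B, 0 ≤ b ∧ b < (n : Int)) (hnd : B.Nodup) (hf : f ≠ 0 ∨ B = []) :
    ∀ (fuel : Nat) (t : Int), 1 ≤ t →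
      pvLoopA f n (pvLeftOf B f (t - 1) (n : Int)) (pvRightOf B f (t - 1) (n : Int)) fuel
        = pvLoopB B f n t fuel := by
  intro fuel
  induction fuel with
  | zero => intro t ht; rfl
  | succ fuel ih =>
    intro t ht
    by_cases hB : B = []
    · subst hB
      simp [pvLoopA, pvLoopB, pvLeftOf, pvRightOf, pvOccupied]
    · have hf' : f ≠ 0 := hf.resolve_right hB
      have ht0 : (0 : Int) ≤ t - 1 := by omega
      have hndL := pv_leftOf_nodup B f t (n : Int) hnd
      have hndR := pv_rightOf_nodup B f t (n : Int) hnd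
      have hstepL := pv_step_left B f (t - 1) (n : Int) hf' ht0 hb
      have hstepR := pv_step_right B f (t - 1) (n : Int) hf' ht0 hb
      rw [sub_add_cancel] at hstepL hstepR
      have hempty := pv_empty_iff B f (t - 1) (n : Int)
      have hupdL : pvUpdatedA ((pvLeftOf B f (t - 1) (n : Int)).map (fun x => x - f)) (n : Int)
          = pvLeftOf B f t (n : Int) := by
        unfold pvUpdatedA
        rw [hstepL]
        exact PySem.Set.ofList_eq_self_of_nodup _ hndL
      have hupdR : pvUpdatedA ((pvRightOf B f (t - 1) (n : Int)).map (fun x => x + f)) (n : Int)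
          = pvRightOf B f t (n : Int) := by
        unfold pvUpdatedA
        rw [hstepR]
        exact PySem.Set.ofList_eq_self_of_nodup _ hndR
      unfold pvLoopA pvLoopB
      cases hocc : pvOccupied B f (t - 1) (n : Int) with
      | false =>
        rw [hocc] at hempty
        simp only [Bool.not_false] at hempty
        rw [hempty]
        simp
      | true =>
        rw [hocc] at hempty
        simp only [Bool.not_true] at hempty
        rw [hempty]
        simp only [Bool.false_eq_true, if_false, if_pos trivial]
        rw [hupdL, hupdR]
        congr 1
        · rw [PySem.Set.ofList_eq_self_of_nodup _ hndL, PySem.Set.ofList_eq_self_of_nodup _ hndR]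
          exact pv_frame_eq n _ _ (pv_leftOf_bounds B f t (n : Int)) (pv_rightOf_bounds B f t (n : Int))
        · have h := ih (t + 1) (by omega)
          rw [add_sub_cancel_right] at h
          exact h

-- the validity guards of both ports pass under Pre_
theorem pv_diff_nil (cs : List Char) (h : ∀ c ∈ cs, c = '.' ∨ c = 'B') :
    PySem.Set.diff (PySem.Set.ofList cs) (PySem.Set.ofList ['.', 'B']) = [] := by
  rw [List.eq_nil_iff_forall_not_mem]
  intro c hc
  rw [PySem.Set.mem_diff] at hc
  exact hc.2 (by rcases h c ((PySem.Set.mem_ofList cs c).mp hc.1) with h' | h' <;>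
    simp [PySem.Set.mem_ofList, h'])

-- ===== VERDICT (by name: the statement is the Claim_ definition above) =====
theorem generate_animations_py_spec : Claim_equal_generate_animations_py := by
  intro bombs force _hdom hpre
  obtain ⟨hvalid0, hforce⟩ := hpre
  have hvalid : ∀ c ∈ bombs.toList, c = '.' ∨ c = 'B' := by
    intro c hc
    have := List.all_eq_true.mp hvalid0 c hc
    simpa using this
  unfold Spec_generate_animations_py generate_animations_py generate_animations_py_alt
  rw [if_neg (by simp [pv_diff_nil bombs.toList hvalid])]
  have hgnot : ¬ (bombs.toList.any (fun c => decide ¬(c = '.' ∨ c = 'B')) = true) := by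
    rw [List.any_eq_true]
    rintro ⟨c, hc, hp⟩
    exact (of_decide_eq_true hp) (hvalid c hc)
  rw [if_neg hgnot]
  show (bombs :: pvLoopA force bombs.toList.length (PySem.Set.ofList (pvBombIdx bombs.toList))
    (PySem.Set.ofList (pvBombIdx bombs.toList)) (bombs.toList.length + 2)) = _
  have hbnd := pv_bombIdx_bounds bombs.toList
  have hnd := pv_bombIdx_nodup bombs.toList
  have hf : force ≠ 0 ∨ pvBombIdx bombs.toList = [] := by
    rcases hforce with h | h
    · exact Or.inl h
    · exact Or.inr ((pv_bombIdx_nil_iff bombs.toList).mpr h)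
  have hsim := pv_sim (pvBombIdx bombs.toList) force bombs.toList.length hbnd hnd hf
    (bombs.toList.length + 2) 1 (le_refl 1)
  rw [show (1 : Int) - 1 = 0 by norm_num, pv_leftOf_zero _ _ _ hbnd,
    pv_rightOf_zero _ _ _ hbnd] at hsim
  rw [PySem.Set.ofList_eq_self_of_nodup _ hnd]
  exact congrArg (bombs :: ·) hsim
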